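-- pv_equiv track=rewrite | github.com/ignaciolinari/beyond-the-cutoff | src/beyond_the_cutoff/evaluation/retrieval_metrics.py | _first_relevant_rank
-- ===== SOURCE A (Python) =====
-- from collections.abc import Iterable, Mapping, Sequence
--
-- def _first_relevant_rank(
--     retrieved_ids: Sequence[int],
--     relevant_ids: Sequence[int],
-- ) -> int | None:
--     relevant_set = set(relevant_ids)
--     for idx, chunk_id in enumerate(retrieved_ids, start=1):
--         if chunk_id in relevant_set:
--             return idx
--     return None
-- ===== SOURCE B (Python) =====
-- def _first_relevant_rank(retrieved_ids, relevant_ids):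
--     pos = {}
--     for i, cid in enumerate(retrieved_ids, start=1):
--         if cid not in pos:
--             pos[cid] = i
--     best = None
--     for rid in relevant_ids:
--         p = pos.get(rid)
--         if p is not None and (best is None or p < best):
--             best = p
--     return best
-- ===== Notes on version B (the rewrite author's own statement) =====
-- stated objective: alternative
-- what changed: Inverts the scan: instead of walking retrieved_ids and testing membership in a set of relevant ids with an early return, B builds a dict from each retrieved id to its first 1-based position and then takes the minimum position found over relevant_ids.
import Mathlib
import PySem

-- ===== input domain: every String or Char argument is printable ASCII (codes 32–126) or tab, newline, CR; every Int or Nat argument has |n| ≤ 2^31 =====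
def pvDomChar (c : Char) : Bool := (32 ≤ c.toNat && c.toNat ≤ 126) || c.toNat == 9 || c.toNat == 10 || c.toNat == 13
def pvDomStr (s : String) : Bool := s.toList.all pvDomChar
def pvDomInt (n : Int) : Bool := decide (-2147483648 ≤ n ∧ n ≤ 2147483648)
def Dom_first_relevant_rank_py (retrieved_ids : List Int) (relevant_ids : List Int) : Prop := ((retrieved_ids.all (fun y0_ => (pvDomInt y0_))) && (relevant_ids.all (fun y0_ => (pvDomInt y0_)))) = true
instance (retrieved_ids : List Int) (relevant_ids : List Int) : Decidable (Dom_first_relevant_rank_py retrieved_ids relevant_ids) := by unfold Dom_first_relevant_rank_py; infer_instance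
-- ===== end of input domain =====

-- B replaces A's early-return scan of retrieved_ids (membership in a set of relevant ids) by an
-- index dict from each retrieved id to its first 1-based position, minimised over relevant_ids.

-- ===== PORT A =====
-- the 'for idx, chunk_id in enumerate(retrieved_ids, start=1): if chunk_id in relevant_set: return idx' loop
def firstRelGoA (relevant_set : PySem.Set Int) : List Int → Int → Option Int
  | [], _ => none
  | c :: rest, idx =>
      if PySem.Set.contains relevant_set c then some idx else firstRelGoA relevant_set rest (idx + 1)

def first_relevant_rank_py (retrieved_ids : List Int) (relevant_ids : List Int) : Option Int :=
  firstRelGoA (PySem.Set.ofList relevant_ids) retrieved_ids 1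

-- ===== PORT B =====
def first_relevant_rank_py_alt (retrieved_ids : List Int) (relevant_ids : List Int) : Option Int :=
  let pos : PySem.Dict Int Int :=
    (PySem.List.enumerate retrieved_ids 1).foldl
      (fun d p => if d.contains p.2 then d else d.insert p.2 p.1) PySem.Dict.empty
  relevant_ids.foldl
    (fun best rid =>
      match pos.get? rid with
      | none => best
      | some p =>
          match best with
          | none => some p
          | some q => if p < q then some p else best)
    none

-- ===== PRECONDITION & SPEC =====
def Spec_first_relevant_rank_py (retrieved_ids : List Int) (relevant_ids : List Int) (out : Option Int) : Prop := out = first_relevant_rank_py_alt retrieved_ids relevant_ids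
instance (retrieved_ids : List Int) (relevant_ids : List Int) (out : Option Int) : Decidable (Spec_first_relevant_rank_py retrieved_ids relevant_ids out) := by unfold Spec_first_relevant_rank_py; infer_instance

-- ===== CLAIM (what is proved, stated in full; the proofs are below) =====
def Claim_equal_first_relevant_rank_py : Prop := ∀ (retrieved_ids : List Int) (relevant_ids : List Int), Dom_first_relevant_rank_py retrieved_ids relevant_ids → Spec_first_relevant_rank_py retrieved_ids relevant_ids (first_relevant_rank_py retrieved_ids relevant_ids)

-- ===== LEMMAS AND PROOFS =====

-- first (1-based from i) position of x in xs, the value B's dict stores for x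
def firstPos (x : Int) : List Int → Int → Option Int
  | [], _ => none
  | c :: rest, i => if c = x then some i else firstPos x rest (i + 1)

-- B's accumulator step over relevant_ids, with the lookup abstracted as f
def bStep (f : Int → Option Int) (best : Option Int) (rid : Int) : Option Int :=
  match f rid with
  | none => best
  | some p =>
      match best with
      | none => some p
      | some q => if p < q then some p else best

lemma dict_fold_get? (x : Int) :
    ∀ (xs : List Int) (d : PySem.Dict Int Int) (i : Int),
      ((PySem.List.enumerate xs i).foldl
          (fun d p => if d.contains p.2 then d else d.insert p.2 p.1) d).get? x =
        match d.get? x with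
        | some v => some v
        | none => firstPos x xs i := by
  intro xs
  induction xs with
  | nil =>
      intro d i
      simp [PySem.List.enumerate_nil, firstPos]
      cases d.get? x <;> rfl
  | cons c rest ih =>
      intro d i
      rw [PySem.List.enumerate_cons]
      simp only [List.foldl_cons]
      rw [ih]
      by_cases hc : c = x
      · subst hc
        rcases hd : d.get? c with _ | v
        · have : d.contains c = false := by
            rw [PySem.Dict.contains_eq_isSome_get?, hd]; rfl
          simp [this, PySem.Dict.get?_insert_self, firstPos]
        · have : d.contains c = true := by
            rw [PySem.Dict.contains_eq_isSome_get?, hd]; rfl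
          simp [this, hd]
      · have hget : ∀ (d' : PySem.Dict Int Int),
            (if d'.contains c then d' else d'.insert c i).get? x = d'.get? x := by
          intro d'
          split
          · rfl
          · exact PySem.Dict.get?_insert_of_ne _ _ (fun h => hc h.symm)
        rw [hget]
        rcases hd : d.get? x with _ | v <;> simp [firstPos, hc]

lemma firstPos_ge (x : Int) :
    ∀ (xs : List Int) (i j : Int), firstPos x xs i = some j → i ≤ j := by
  intro xs
  induction xs with
  | nil => intro i j h; simp [firstPos] at h
  | cons c rest ih =>
      intro i j h
      by_cases hc : c = x
      · simp [firstPos, hc] at h; omega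
      · simp [firstPos, hc] at h
        have := ih (i + 1) j h
        omega

lemma bfold_none (f : Int → Option Int) :
    ∀ (l : List Int) (b : Option Int), (∀ r ∈ l, f r = none) → l.foldl (bStep f) b = b := by
  intro l
  induction l with
  | nil => intro b _; rfl
  | cons r l ih =>
      intro b h
      simp only [List.foldl_cons]
      have hr : f r = none := h r (by simp)
      have : bStep f b r = b := by simp [bStep, hr]
      rw [this]
      exact ih b (fun r' hr' => h r' (by simp [hr']))

lemma bfold_min (f : Int → Option Int) (i : Int) :
    ∀ (l : List Int) (b : Option Int),
      (∀ r ∈ l, ∀ j, f r = some j → i ≤ j) →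
      (∀ j, b = some j → i ≤ j) →
      (b = some i ∨ ∃ r ∈ l, f r = some i) →
      l.foldl (bStep f) b = some i := by
  intro l
  induction l with
  | nil =>
      intro b _ _ hw
      rcases hw with hb | ⟨r, hr, _⟩
      · simpa using hb
      · simp at hr
  | cons r l ih =>
      intro b hbound hb hw
      simp only [List.foldl_cons]
      apply ih
      · intro r' hr' j hj; exact hbound r' (by simp [hr']) j hj
      · intro j hj
        rcases hf : f r with _ | p
        · simp [bStep, hf] at hj; exact hb j hj
        · have hip : i ≤ p := hbound r (by simp) p hf
          rcases b with _ | q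
          · simp [bStep, hf] at hj; omega
          · have hq : i ≤ q := hb q rfl
            simp [bStep, hf] at hj
            split at hj <;> simp_all
      · rcases hw with hb' | ⟨r', hr', hf'⟩
        · subst hb'
          left
          rcases hf : f r with _ | p
          · simp [bStep, hf]
          · have hip : i ≤ p := hbound r (by simp) p hf
            simp [bStep, hf]
            intro h; omega
        · rcases List.mem_cons.mp hr' with h | h
          · subst h
            left
            rcases b with _ | q
            · simp [bStep, hf']
            · have hq : i ≤ q := hb q rfl
              simp [bStep, hf']
              intro h; omega
          · right; exact ⟨r', h, hf'⟩

lemma foldl_congr_members {α β : Type} (l : List α) (f g : β → α → β) (b : β)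
    (h : ∀ acc x, x ∈ l → f acc x = g acc x) : l.foldl f b = l.foldl g b := by
  induction l generalizing b with
  | nil => rfl
  | cons x l ih =>
      simp only [List.foldl_cons]
      rw [h b x (by simp)]
      exact ih _ (fun acc y hy => h acc y (by simp [hy]))

lemma main_lemma (relevant : List Int) :
    ∀ (xs : List Int) (i : Int),
      relevant.foldl (bStep (fun r => firstPos r xs i)) none =
        firstRelGoA (PySem.Set.ofList relevant) xs i := by
  intro xs
  induction xs with
  | nil =>
      intro i
      rw [bfold_none (fun r => firstPos r [] i) relevant none (fun r _ => rfl)]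
      rfl
  | cons c rest ih =>
      intro i
      by_cases hc : c ∈ relevant
      · have hcont : PySem.Set.contains (PySem.Set.ofList relevant) c = true := by
          rw [PySem.Set.contains_iff, PySem.Set.mem_ofList]; exact hc
        rw [firstRelGoA, if_pos hcont]
        apply bfold_min
        · intro r _ j hj
          by_cases hrc : c = r
          · simp [firstPos, hrc] at hj; omega
          · simp [firstPos, hrc] at hj
            have := firstPos_ge r rest (i + 1) j hj
            omega
        · intro j hj; simp at hj
        · right; exact ⟨c, hc, by simp [firstPos]⟩
      · have hcont : PySem.Set.contains (PySem.Set.ofList relevant) c = false := by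
          rw [Bool.eq_false_iff]
          intro h
          rw [PySem.Set.contains_iff, PySem.Set.mem_ofList] at h
          exact hc h
        rw [firstRelGoA]
        simp only [hcont, Bool.false_eq_true, if_false]
        rw [← ih (i + 1)]
        apply foldl_congr_members
        intro acc r hr
        have hrc : c ≠ r := fun h => hc (h ▸ hr)
        simp [bStep, firstPos, hrc]

-- ===== VERDICT (by name: the statement is the Claim_ definition above) =====
theorem first_relevant_rank_py_spec : Claim_equal_first_relevant_rank_py := by
  intro retrieved relevant _
  unfold Spec_first_relevant_rank_py first_relevant_rank_py first_relevant_rank_py_alt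
  rw [← main_lemma relevant retrieved 1]
  have hpt : ∀ (acc : Option Int) (r : Int), r ∈ relevant →
      bStep (fun r => firstPos r retrieved 1) acc r
        = bStep (fun rid => ((PySem.List.enumerate retrieved 1).foldl
          (fun d p => if d.contains p.2 then d else d.insert p.2 p.1) PySem.Dict.empty).get? rid) acc r := by
    intro acc r _
    unfold bStep
    simp only [dict_fold_get?]
    simp [PySem.Dict.get?_empty]
  exact foldl_congr_members relevant _ _ none hpt
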